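-- pv_equiv track=rewrite | github.com/IvanMartynenko/unpackWLD | blender/plugin.py | build_edges_and_faces_signed
-- ===== SOURCE A (Python) =====
-- from typing import Any, Dict, List, Optional, Tuple
--
-- def build_edges_and_faces_signed(tris: List[List[int]]) -> Tuple[List[List[int]], List[List[int]]]:
--     edge_map: Dict[str, int] = {}
--     edges: List[List[int]] = []
--     for (a, b, c) in tris:
--         for u, v in ((a, b), (b, c), (c, a)):
--             va, vb = (u, v) if u <= v else (v, u)
--             key = f"{va}|{vb}"
--             if key not in edge_map:
--                 edge_map[key] = len(edges)
--                 edges.append([va, vb])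
--     faces_signed: List[List[int]] = []
--     for (a, b, c) in tris:
--         e0 = signed_edge_index(edge_map, a, b)
--         e1 = signed_edge_index(edge_map, b, c)
--         e2 = signed_edge_index(edge_map, c, a)
--         faces_signed.append([e0, e1, e2])
--     return edges, faces_signed
--
-- def signed_edge_index(edge_map: Dict[str, int], a: int, b: int) -> int:
--     va, vb = (a, b) if a <= b else (b, a)
--     key = f"{va}|{vb}"
--     idx = edge_map.get(key)
--     if idx is None:
--         raise RuntimeError(f"edge not found for {a}-{b}")
--     same_dir = (a == va) and (b == vb)
--     return idx if same_dir else -(idx + 1)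
-- ===== SOURCE B (Python) =====
-- from typing import Dict, List, Tuple
--
-- def build_edges_and_faces_signed(tris: List[List[int]]) -> Tuple[List[List[int]], List[List[int]]]:
--     edge_map: Dict[str, int] = {}
--     edges: List[List[int]] = []
--     faces_signed: List[List[int]] = []
--     for a, b, c in tris:
--         face: List[int] = []
--         for u, v in ((a, b), (b, c), (c, a)):
--             va, vb = (u, v) if u <= v else (v, u)
--             key = f"{va}|{vb}"
--             idx = edge_map.get(key)
--             if idx is None:
--                 idx = len(edges)
--                 edge_map[key] = idx
--                 edges.append([va, vb])
--             face.append(idx if (u, v) == (va, vb) else -(idx + 1))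
--         faces_signed.append(face)
--     return edges, faces_signed
-- ===== Notes on version B (the rewrite author's own statement) =====
-- stated objective: simpler
-- what changed: A's two traversals (an edge-dedup pass, then a second pass over tris calling a signed_edge_index helper that re-looks-up every edge in the finished map) are fused into a single loop that assigns each edge's signed index inline as edges are discovered, so the second scan and the helper disappear.
import Mathlib
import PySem

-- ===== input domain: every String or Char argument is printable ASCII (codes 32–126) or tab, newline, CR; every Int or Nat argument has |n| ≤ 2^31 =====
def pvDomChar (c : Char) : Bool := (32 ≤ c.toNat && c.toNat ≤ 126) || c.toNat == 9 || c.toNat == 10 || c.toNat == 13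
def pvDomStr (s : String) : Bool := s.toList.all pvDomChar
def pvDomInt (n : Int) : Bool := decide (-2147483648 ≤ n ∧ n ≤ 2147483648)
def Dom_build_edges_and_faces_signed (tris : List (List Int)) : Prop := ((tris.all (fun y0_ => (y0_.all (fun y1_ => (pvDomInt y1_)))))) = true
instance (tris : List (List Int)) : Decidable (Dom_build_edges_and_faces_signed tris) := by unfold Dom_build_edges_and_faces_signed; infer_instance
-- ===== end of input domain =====

-- B fuses A's two passes (edge-dedup pass + a second pass calling signed_edge_index on the
-- finished map) into a single traversal that assigns each signed edge index inline; simpler.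

-- ===== PORT A =====
-- the f-string key f"{va}|{vb}", as a list of characters (exact: PySem.Int.toChars = str(n))
def pvEdgeKey (va vb : Int) : List Char := PySem.Int.toChars va ++ '|' :: PySem.Int.toChars vb

-- body of A's inner edge loop: normalize, skip if known, else record a fresh edge
def pvStepEdgeA (st : PySem.Dict (List Char) Int × List (List Int)) (u v : Int) :
    PySem.Dict (List Char) Int × List (List Int) :=
  let p := if u ≤ v then (u, v) else (v, u)
  let key := pvEdgeKey p.1 p.2
  if st.1.contains key then st
  else (st.1.insert key (st.2.length : Int), st.2 ++ [[p.1, p.2]])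

-- body of A's first loop over tris (unpacking `for (a, b, c) in tris`; other shapes raise
-- ValueError in Python and are excluded by Pre_; here the state is left unchanged)
def pvStepRowA (st : PySem.Dict (List Char) Int × List (List Int)) (t : List Int) :
    PySem.Dict (List Char) Int × List (List Int) :=
  match t with
  | [a, b, c] => pvStepEdgeA (pvStepEdgeA (pvStepEdgeA st a b) b c) c a
  | _ => st

def signed_edge_index (edge_map : PySem.Dict (List Char) Int) (a b : Int) : Int :=
  let p := if a ≤ b then (a, b) else (b, a)
  match edge_map.get? (pvEdgeKey p.1 p.2) with
  | none => 0  -- Python raises RuntimeError here; unreachable under Pre_ (every queried edge was inserted by the first loop)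
  | some idx => if a == p.1 && b == p.2 then idx else -(idx + 1)

-- body of A's second loop over tris
def pvFaceRowA (edge_map : PySem.Dict (List Char) Int) (t : List Int) : List Int :=
  match t with
  | [a, b, c] => [signed_edge_index edge_map a b, signed_edge_index edge_map b c,
                  signed_edge_index edge_map c a]
  | _ => []

def build_edges_and_faces_signed (tris : List (List Int)) : List (List Int) × List (List Int) :=
  let st := tris.foldl pvStepRowA (PySem.Dict.empty, [])
  (st.2, tris.map (pvFaceRowA st.1))

-- ===== PORT B =====
-- B's inner loop body: normalize, look up (creating the edge if absent), and return the new
-- state together with the signed index computed inline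
def pvStepEdgeB (st : PySem.Dict (List Char) Int × List (List Int)) (u v : Int) :
    (PySem.Dict (List Char) Int × List (List Int)) × Int :=
  let p := if u ≤ v then (u, v) else (v, u)
  let key := pvEdgeKey p.1 p.2
  match st.1.get? key with
  | some idx => (st, if u == p.1 && v == p.2 then idx else -(idx + 1))
  | none =>
      let idx : Int := st.2.length
      ((st.1.insert key idx, st.2 ++ [[p.1, p.2]]),
       if u == p.1 && v == p.2 then idx else -(idx + 1))

-- B's single loop body over tris
def pvStepRowB (st : PySem.Dict (List Char) Int × List (List Int) × List (List Int))
    (t : List Int) : PySem.Dict (List Char) Int × List (List Int) × List (List Int) :=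
  match t with
  | [a, b, c] =>
      let r0 := pvStepEdgeB (st.1, st.2.1) a b
      let r1 := pvStepEdgeB r0.1 b c
      let r2 := pvStepEdgeB r1.1 c a
      (r2.1.1, r2.1.2, st.2.2 ++ [[r0.2, r1.2, r2.2]])
  | _ => st

def build_edges_and_faces_signed_alt (tris : List (List Int)) :
    List (List Int) × List (List Int) :=
  let st := tris.foldl pvStepRowB (PySem.Dict.empty, [], [])
  (st.2.1, st.2.2)

-- ===== PRECONDITION & SPEC =====
-- Pre_ excludes rows whose length is not 3: Python's `for (a, b, c) in tris` raises ValueError there.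
def Pre_build_edges_and_faces_signed (tris : List (List Int)) : Prop :=
  ∀ t ∈ tris, t.length = 3
instance (tris : List (List Int)) : Decidable (Pre_build_edges_and_faces_signed tris) := by
  unfold Pre_build_edges_and_faces_signed; infer_instance

def pvWitness_build_edges_and_faces_signed : List (List Int) := [[1, 2, 3], [2, 1, 4]]

def Spec_build_edges_and_faces_signed (tris : List (List Int))
    (out : List (List Int) × List (List Int)) : Prop :=
  out = build_edges_and_faces_signed_alt tris
instance (tris : List (List Int)) (out : List (List Int) × List (List Int)) :
    Decidable (Spec_build_edges_and_faces_signed tris out) := by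
  unfold Spec_build_edges_and_faces_signed; infer_instance

-- ===== CLAIM =====
def Claim_equal_build_edges_and_faces_signed : Prop :=
  ∀ (tris : List (List Int)), Dom_build_edges_and_faces_signed tris →
    Pre_build_edges_and_faces_signed tris →
    Spec_build_edges_and_faces_signed tris (build_edges_and_faces_signed tris)

-- ===== LEMMAS AND PROOFS =====

-- d' still answers every lookup d answers (A's map only ever gains fresh keys)
def PvGrows (d d' : PySem.Dict (List Char) Int) : Prop :=
  ∀ k v, d.get? k = some v → d'.get? k = some v

theorem pvGrows_refl (d : PySem.Dict (List Char) Int) : PvGrows d d := fun _ _ h => h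

theorem pvGrows_trans {d₁ d₂ d₃ : PySem.Dict (List Char) Int}
    (h₁ : PvGrows d₁ d₂) (h₂ : PvGrows d₂ d₃) : PvGrows d₁ d₃ :=
  fun k v h => h₂ k v (h₁ k v h)

theorem pvGrows_stepEdgeA (st : PySem.Dict (List Char) Int × List (List Int)) (u v : Int) :
    PvGrows st.1 (pvStepEdgeA st u v).1 := by
  intro k w hk
  simp only [pvStepEdgeA]
  by_cases hc : st.1.contains (pvEdgeKey (if u ≤ v then (u, v) else (v, u)).1
      (if u ≤ v then (u, v) else (v, u)).2) = true
  · simpa [hc] using hk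
  · have hkey : st.1.get? (pvEdgeKey (if u ≤ v then (u, v) else (v, u)).1
        (if u ≤ v then (u, v) else (v, u)).2) = none := by
      rw [PySem.Dict.get?_eq_none_iff_contains]; simpa using hc
    have hne : k ≠ pvEdgeKey (if u ≤ v then (u, v) else (v, u)).1
        (if u ≤ v then (u, v) else (v, u)).2 := by
      intro he; rw [he, hkey] at hk; cases hk
    simp [hc, PySem.Dict.get?_insert_of_ne _ _ hne, hk]

theorem pvGrows_stepRowA (st : PySem.Dict (List Char) Int × List (List Int)) (t : List Int) :
    PvGrows st.1 (pvStepRowA st t).1 := by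
  unfold pvStepRowA
  split
  · exact pvGrows_trans (pvGrows_stepEdgeA _ _ _)
      (pvGrows_trans (pvGrows_stepEdgeA _ _ _) (pvGrows_stepEdgeA _ _ _))
  · exact pvGrows_refl _

theorem pvGrows_foldlA (l : List (List Int)) (st : PySem.Dict (List Char) Int × List (List Int)) :
    PvGrows st.1 (l.foldl pvStepRowA st).1 := by
  induction l generalizing st with
  | nil => exact pvGrows_refl _
  | cons t l ih =>
      exact pvGrows_trans (pvGrows_stepRowA st t) (ih (pvStepRowA st t))

-- B's state update is exactly A's first-pass update
theorem pvStepEdgeB_fst (st : PySem.Dict (List Char) Int × List (List Int)) (u v : Int) :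
    (pvStepEdgeB st u v).1 = pvStepEdgeA st u v := by
  simp only [pvStepEdgeA, pvStepEdgeB]
  cases h : st.1.get? (pvEdgeKey (if u ≤ v then (u, v) else (v, u)).1
      (if u ≤ v then (u, v) else (v, u)).2) <;>
    simp [PySem.Dict.contains_eq_isSome_get?, h]

-- B's inline signed index is what A's helper computes from any later (grown) map
theorem pvStepEdgeB_snd (st : PySem.Dict (List Char) Int × List (List Int)) (u v : Int)
    (M : PySem.Dict (List Char) Int) (hM : PvGrows (pvStepEdgeA st u v).1 M) :
    (pvStepEdgeB st u v).2 = signed_edge_index M u v := by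
  simp only [pvStepEdgeA] at hM
  simp only [pvStepEdgeB, signed_edge_index]
  cases h : st.1.get? (pvEdgeKey (if u ≤ v then (u, v) else (v, u)).1
      (if u ≤ v then (u, v) else (v, u)).2) with
  | some idx =>
      have hc : st.1.contains (pvEdgeKey (if u ≤ v then (u, v) else (v, u)).1
          (if u ≤ v then (u, v) else (v, u)).2) = true := by
        rw [PySem.Dict.contains_eq_isSome_get?, h]; rfl
      simp only [hc, if_true] at hM
      have := hM _ _ h
      simp [this]
  | none =>
      have hc : st.1.contains (pvEdgeKey (if u ≤ v then (u, v) else (v, u)).1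
          (if u ≤ v then (u, v) else (v, u)).2) = false := by
        rw [PySem.Dict.contains_eq_isSome_get?, h]; rfl
      simp only [hc, if_false, Bool.false_eq_true] at hM
      have := hM _ _ (PySem.Dict.get?_insert_self _ _ _)
      simp [this]

-- one fused row of B = A's first-pass row update plus the face row read off the final map
theorem pvStepRowB_eq (d : PySem.Dict (List Char) Int) (e f : List (List Int))
    (t : List Int) (ht : t.length = 3) (M : PySem.Dict (List Char) Int)
    (hM : PvGrows (pvStepRowA (d, e) t).1 M) :
    pvStepRowB (d, e, f) t =
      ((pvStepRowA (d, e) t).1, (pvStepRowA (d, e) t).2, f ++ [pvFaceRowA M t]) := by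
  match t, ht with
  | [a, b, c], _ =>
    simp only [pvStepRowB, pvStepRowA, pvFaceRowA] at *
    have h0 : PvGrows (pvStepEdgeA (d, e) a b).1 M :=
      pvGrows_trans (pvGrows_stepEdgeA _ b c)
        (pvGrows_trans (pvGrows_stepEdgeA _ c a) hM)
    have h1 : PvGrows (pvStepEdgeA (pvStepEdgeA (d, e) a b) b c).1 M :=
      pvGrows_trans (pvGrows_stepEdgeA _ c a) hM
    rw [pvStepEdgeB_fst, pvStepEdgeB_fst, pvStepEdgeB_fst,
        pvStepEdgeB_snd _ _ _ _ h0, pvStepEdgeB_snd _ _ _ _ h1,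
        pvStepEdgeB_snd _ _ _ _ hM]

-- the fused loop carries A's first-pass state and accumulates A's second-pass rows
theorem pvFoldB_eq (l : List (List Int)) (d : PySem.Dict (List Char) Int)
    (e f : List (List Int)) (hl : ∀ t ∈ l, t.length = 3)
    (M : PySem.Dict (List Char) Int) (hM : PvGrows (l.foldl pvStepRowA (d, e)).1 M) :
    l.foldl pvStepRowB (d, e, f) =
      ((l.foldl pvStepRowA (d, e)).1, (l.foldl pvStepRowA (d, e)).2,
        f ++ l.map (pvFaceRowA M)) := by
  induction l generalizing d e f with
  | nil => simp
  | cons t l ih =>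
      simp only [List.foldl_cons, List.map_cons] at *
      have hgrow : PvGrows (pvStepRowA (d, e) t).1 M :=
        pvGrows_trans (pvGrows_foldlA l _) hM
      rw [pvStepRowB_eq d e f t (hl t (by simp)) M hgrow]
      rw [ih (pvStepRowA (d, e) t).1 (pvStepRowA (d, e) t).2
            (f ++ [pvFaceRowA M t]) (fun t' h => hl t' (by simp [h])) (by simpa using hM)]
      simp

-- ===== VERDICT =====
theorem build_edges_and_faces_signed_spec : Claim_equal_build_edges_and_faces_signed := by
  intro tris _ hpre
  unfold Spec_build_edges_and_faces_signed build_edges_and_faces_signed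
    build_edges_and_faces_signed_alt
  rw [pvFoldB_eq tris PySem.Dict.empty [] [] hpre _ (pvGrows_refl _)]
  simp
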